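-- pv_equiv track=rewrite | github.com/tsatsulya/llvm_course | trace/stat.py | find_patterns
-- ===== SOURCE A (Python) =====
-- def find_patterns(list_a, list_b):
--     min_len = 2
--
--     def find_ngrams(input_list, n):
--         return zip(*[input_list[i:] for i in range(n)])
--
--     seq_list_a = []
--     for seq_len in range(min_len, len(list_a) + 1):
--         seq_list_a += [val for val in find_ngrams(list_a, seq_len)]
--
--     counter = {}
--     for seq in seq_list_a:
--         counter[seq] = counter.get(seq, 0) + 1
--
--     filtered_counter = {k: v for k, v in counter.items() if v > 1}
--
--     return filtered_counter
-- ===== SOURCE B (Python) =====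
-- def find_patterns(list_a, list_b):
--     # Level-wise (Apriori-style) counting with early stop: count length-k windows,
--     # keep the repeated ones, and stop at the first length with no repeats
--     # (a repeated (k+1)-window would force a repeated k-window).
--     n = len(list_a)
--     result = []
--     k = 2
--     while k <= n:
--         counts = {}
--         for i in range(n - k + 1):
--             w = tuple(list_a[i:i + k])
--             counts[w] = counts.get(w, 0) + 1
--         frequent = [(w, c) for (w, c) in counts.items() if c > 1]
--         if not frequent:
--             break
--         result += frequent
--         k += 1
--     return dict(result)
-- ===== Notes on version B (the rewrite author's own statement) =====
-- stated objective: alternative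
-- what changed: A materializes every n-gram of every length (2..n), counts them all in one dict and filters; B counts windows level by level (one dict per length) and stops at the first length with no repeated window, since a repeated (k+1)-window would force a repeated k-window.
import Mathlib
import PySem

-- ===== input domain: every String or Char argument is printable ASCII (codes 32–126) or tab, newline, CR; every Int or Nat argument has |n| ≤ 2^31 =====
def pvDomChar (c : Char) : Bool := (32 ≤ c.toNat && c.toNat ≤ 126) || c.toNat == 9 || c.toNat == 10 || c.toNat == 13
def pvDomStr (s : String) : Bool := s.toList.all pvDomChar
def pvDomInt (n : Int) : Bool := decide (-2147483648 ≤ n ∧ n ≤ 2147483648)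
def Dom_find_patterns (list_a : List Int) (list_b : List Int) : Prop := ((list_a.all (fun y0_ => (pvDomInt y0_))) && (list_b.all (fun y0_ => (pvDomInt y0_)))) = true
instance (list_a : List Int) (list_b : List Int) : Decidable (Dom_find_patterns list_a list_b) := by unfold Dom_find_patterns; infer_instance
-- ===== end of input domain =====

-- B replaces A's materialize-all-ngrams-then-count pass by level-wise counting with an
-- early stop at the first window length with no repeated window (objective: alternative).

-- ===== PORT A =====
-- zip(*lists): repeatedly take the heads of all the lists until one is exhausted (exact for Python zip of lists).
def zipN (ls : List (List Int)) : List (List Int) :=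
  if h : ls ≠ [] ∧ ∀ l ∈ ls, l ≠ [] then
    ls.map (fun l => l.headD 0) :: zipN (ls.map List.tail)
  else []
termination_by (ls.headD []).length
decreasing_by
  obtain ⟨h1, h2⟩ := h
  match ls with
  | l :: rest =>
    have hl : l ≠ [] := h2 l (by simp)
    simp only [List.map_cons, List.headD_cons]
    have : l.tail.length = l.length - 1 := List.length_tail ..
    cases l with
    | nil => exact absurd rfl hl
    | cons a t => simp

def find_ngrams (input_list : List Int) (n : Int) : List (List Int) :=
  zipN ((PySem.List.pyRange 0 n 1).map (fun i => PySem.List.slice input_list (some i) none))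

def find_patterns (list_a : List Int) (list_b : List Int) : List (List Int × Int) :=
  let min_len : Int := 2
  let seq_list_a : List (List Int) :=
    (PySem.List.pyRange min_len ((list_a.length : Int) + 1) 1).foldl
      (fun acc seq_len => acc ++ (find_ngrams list_a seq_len)) []
  let counter : PySem.Dict (List Int) Int :=
    seq_list_a.foldl (fun d seq => d.insert seq (d.getD seq 0 + 1)) PySem.Dict.empty
  let filtered : PySem.Dict (List Int) Int :=
    counter.items.foldl (fun d p => if p.2 > 1 then d.insert p.1 p.2 else d) PySem.Dict.empty
  filtered.items

-- ===== PORT B =====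
def altLevel (l : List Int) (n k : Int) : List (List Int × Int) :=
  let counts : PySem.Dict (List Int) Int :=
    (PySem.List.pyRange 0 (n - k + 1) 1).foldl
      (fun d i =>
        let w := PySem.List.slice l (some i) (some (i + k))
        d.insert w (d.getD w 0 + 1)) PySem.Dict.empty
  counts.items.filter (fun p => p.2 > 1)

def altGo (l : List Int) (n k : Int) (result : List (List Int × Int)) : List (List Int × Int) :=
  if h : k ≤ n then
    let frequent := altLevel l n k
    if frequent = [] then result
    else altGo l n (k + 1) (result ++ frequent)
  else result
termination_by (n + 1 - k).toNat
decreasing_by omega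

def find_patterns_alt (list_a : List Int) (list_b : List Int) : List (List Int × Int) :=
  let n : Int := list_a.length
  (PySem.Dict.ofList (altGo list_a n 2 [])).items

-- ===== PRECONDITION & SPEC =====
def Spec_find_patterns (list_a : List Int) (list_b : List Int) (out : List (List Int × Int)) : Prop := out = find_patterns_alt list_a list_b
instance (list_a : List Int) (list_b : List Int) (out : List (List Int × Int)) : Decidable (Spec_find_patterns list_a list_b out) := by unfold Spec_find_patterns; infer_instance

-- ===== CLAIM (what is proved, stated in full; the proofs are below) =====
def Claim_equal_find_patterns : Prop := ∀ (list_a : List Int) (list_b : List Int), Dom_find_patterns list_a list_b → Spec_find_patterns list_a list_b (find_patterns list_a list_b)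

-- ===== LEMMAS AND PROOFS =====

-- the list of length-k contiguous windows of l, left to right
def wins (k : Nat) : List Int → List (List Int)
  | [] => []
  | x :: t => if k ≤ t.length + 1 then (x :: t).take k :: wins k t else []

-- the repeated length-k windows with their counts, in first-occurrence order
def winF (l : List Int) (k : Nat) : List (List Int × Int) :=
  ((PySem.Set.ofList (wins k l)).map
    (fun w => (w, (↑(List.count w (wins k l)) : Int)))).filter (fun p => p.2 > 1)

theorem wins_eq_nil_of_lt (k : Nat) (l : List Int) (h : l.length < k) : wins k l = [] := by
  cases l with
  | nil => rfl
  | cons x t => simp only [wins]; rw [if_neg]; simp at h ⊢; omega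

theorem length_of_mem_wins (k : Nat) (l : List Int) (w : List Int) (hw : w ∈ wins k l) :
    w.length = k := by
  induction l with
  | nil => simp [wins] at hw
  | cons x t ih =>
    simp only [wins] at hw
    by_cases h : k ≤ t.length + 1
    · rw [if_pos h] at hw
      rcases List.mem_cons.1 hw with h1 | h1
      · subst h1; simp; omega
      · exact ih h1
    · rw [if_neg h] at hw; simp at hw

theorem heads_eq_take (k : Nat) (l : List Int) (h : k ≤ l.length) :
    (List.range k).map (fun j => (l.drop j).headD 0) = l.take k := by
  induction l generalizing k with
  | nil => simp only [List.length_nil, Nat.le_zero] at h; subst h; rfl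
  | cons x t ih =>
    cases k with
    | zero => rfl
    | succ m =>
      rw [List.range_succ_eq_map]
      simp only [List.map_cons, List.map_map, List.drop_zero, List.headD_cons, List.take_succ_cons]
      congr 1
      rw [← ih m (by simpa using h)]
      rfl

theorem zipN_eq_wins (k : Nat) (hk : 1 ≤ k) (l : List Int) :
    zipN ((List.range k).map (fun j => l.drop j)) = wins k l := by
  induction l with
  | nil =>
    rw [zipN, dif_neg, wins]
    rintro ⟨-, h2⟩
    exact h2 (([] : List Int).drop 0) (List.mem_map.2 ⟨0, List.mem_range.2 (by omega), rfl⟩) rfl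
  | cons x t ih =>
    by_cases hlen : k ≤ t.length + 1
    · rw [zipN, dif_pos]
      · have hheads : (((List.range k).map (fun j => (x :: t).drop j)).map (fun l => l.headD 0))
            = (x :: t).take k := by
          rw [List.map_map]
          exact heads_eq_take k (x :: t) (by simpa using hlen)
        have htails : (((List.range k).map (fun j => (x :: t).drop j)).map List.tail)
            = (List.range k).map (fun j => t.drop j) := by
          rw [List.map_map]
          refine List.map_congr_left (fun j _ => ?_)
          simp [List.tail_drop]
        rw [hheads, htails, ih, wins, if_pos hlen]
      · constructor
        · simp only [ne_eq, List.map_eq_nil_iff, List.range_eq_nil]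
          omega
        · intro l' hl'
          obtain ⟨j, hj, rfl⟩ := List.mem_map.1 hl'
          have hj' := List.mem_range.1 hj
          simp only [ne_eq, List.drop_eq_nil_iff]
          simp only [List.length_cons]
          omega
    · rw [zipN, dif_neg, wins_eq_nil_of_lt k (x :: t) (by simp; omega)]
      rintro ⟨-, h2⟩
      refine h2 ((x :: t).drop (k - 1)) (List.mem_map.2 ⟨k - 1, List.mem_range.2 (by omega), rfl⟩) ?_
      simp only [List.drop_eq_nil_iff, List.length_cons]
      omega

theorem ngrams_eq_wins (l : List Int) (k : Int) (hk : 1 ≤ k) :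
    find_ngrams l k = wins k.toNat l := by
  unfold find_ngrams
  rw [PySem.List.pyRange_one, List.map_map]
  have : ((fun i => PySem.List.slice l (some i) none) ∘ fun j : Nat => (0 : Int) + ↑j)
      = fun j : Nat => l.drop j := by
    funext j
    simp [PySem.List.slice_from_natCast]
  rw [show (k - 0).toNat = k.toNat by omega, this]
  exact zipN_eq_wins k.toNat (by omega) l

theorem map_take_drop_eq_wins (k : Nat) (l : List Int) (hk : 1 ≤ k) :
    (List.range (l.length + 1 - k)).map (fun j => (l.drop j).take k) = wins k l := by
  induction l with
  | nil =>
    rw [show ([] : List Int).length + 1 - k = 0 by simp; omega]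
    rfl
  | cons x t ih =>
    by_cases h : k ≤ t.length + 1
    · rw [show (x :: t).length + 1 - k = (t.length + 1 - k) + 1 by simp; omega,
        List.range_succ_eq_map]
      simp only [List.map_cons, List.map_map, List.drop_zero]
      rw [wins, if_pos h]
      have hmap : (List.range (t.length + 1 - k)).map ((fun j => ((x :: t).drop j).take k) ∘ Nat.succ)
          = (List.range (t.length + 1 - k)).map (fun j => (t.drop j).take k) :=
        List.map_congr_left (fun j _ => by simp [List.drop_succ_cons])
      rw [hmap, ih]
    · rw [show (x :: t).length + 1 - k = 0 by simp; omega,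
        wins_eq_nil_of_lt k (x :: t) (by simp; omega)]
      rfl

-- the B-side window list equals wins
theorem bwin_eq_wins (l : List Int) (k : Int) (h1 : 1 ≤ k) (h2 : k ≤ (l.length : Int)) :
    (PySem.List.pyRange 0 ((l.length : Int) - k + 1) 1).map
      (fun i => PySem.List.slice l (some i) (some (i + k))) = wins k.toNat l := by
  rw [PySem.List.pyRange_one]
  rw [List.map_map]
  have hlen : ((l.length : Int) - k + 1 - 0).toNat = l.length + 1 - k.toNat := by omega
  rw [hlen, ← map_take_drop_eq_wins k.toNat l (by omega)]
  refine List.map_congr_left (fun j _ => ?_)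
  simp only [Function.comp_apply, zero_add]
  rw [show ((j : Int) + k) = ((j : Int) + (k.toNat : Int)) from by omega]
  exact PySem.List.slice_natCast_add l j k.toNat

-- dict-comprehension filter of an items list with distinct keys
theorem filter_loop_items (ps : List (List Int × Int)) (hnd : (ps.map (·.1)).Nodup) :
    (ps.foldl (fun d p => if p.2 > 1 then d.insert p.1 p.2 else d)
        (PySem.Dict.empty : PySem.Dict (List Int) Int)).items
      = ps.filter (fun p => p.2 > 1) := by
  rw [PySem.List.foldl_ite_eq_foldl_filter (p := fun p : List Int × Int => p.2 > 1)
      (f := fun (d : PySem.Dict (List Int) Int) (p : List Int × Int) => d.insert p.1 p.2)]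
  have h := PySem.Dict.items_foldl_insert_fresh
      (l := ps.filter (fun p => p.2 > 1)) (k := fun p : List Int × Int => p.1)
      (v := fun p : List Int × Int => p.2) (d := PySem.Dict.empty)
      (fun a _ => by simp [PySem.Dict.contains_empty])
      (((List.filter_sublist (l := ps) (p := fun p => decide (p.2 > 1))).map (fun p : List Int × Int => p.1)).nodup hnd)
  simpa using h

theorem ofList_items (ps : List (List Int × Int)) (hnd : (ps.map (·.1)).Nodup) :
    (PySem.Dict.ofList ps).items = ps := by
  show (ps.foldl (fun d p => d.insert p.1 p.2) PySem.Dict.empty).items = ps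
  have h := PySem.Dict.items_foldl_insert_fresh
      (l := ps) (k := fun p : List Int × Int => p.1)
      (v := fun p : List Int × Int => p.2) (d := PySem.Dict.empty)
      (fun a _ => by simp [PySem.Dict.contains_empty]) hnd
  simpa using h

theorem set_fold_disjoint (ys s t : List (List Int)) (h : ∀ y ∈ ys, y ∉ s) :
    List.foldl PySem.Set.add (s ++ t) ys = s ++ List.foldl PySem.Set.add t ys := by
  induction ys generalizing t with
  | nil => rfl
  | cons y ys ih =>
    have hy : y ∉ s := h y (by simp)
    have hadd : PySem.Set.add (s ++ t) y = s ++ PySem.Set.add t y := by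
      by_cases hc : y ∈ t
      · simp [PySem.Set.add, PySem.Set.contains, hy, hc]
      · simp [PySem.Set.add, PySem.Set.contains, hy, hc]
    rw [List.foldl_cons, hadd, List.foldl_cons, ih _ (fun z hz => h z (by simp [hz]))]

theorem set_ofList_append (xs ys : List (List Int)) (h : ∀ y ∈ ys, y ∉ xs) :
    PySem.Set.ofList (xs ++ ys) = PySem.Set.ofList xs ++ PySem.Set.ofList ys := by
  rw [PySem.Set.ofList_eq_foldl, PySem.Set.ofList_eq_foldl, PySem.Set.ofList_eq_foldl,
    List.foldl_append]
  have h1 : List.foldl PySem.Set.add ([] : List (List Int)) xs = PySem.Set.ofList xs := by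
    rw [PySem.Set.ofList_eq_foldl]
  rw [h1, show (PySem.Set.ofList xs : List (List Int)) = PySem.Set.ofList xs ++ [] from by simp,
    set_fold_disjoint ys _ [] (fun y hy => by simpa [PySem.Set.mem_ofList] using h y hy)]
  simp [PySem.Set.ofList_eq_foldl]

-- the global counter over all levels decomposes into per-level counters
theorem decompose (kl : List Nat) (l : List Int) (hnd : kl.Nodup) :
    ((PySem.Set.ofList (kl.flatMap (fun k => wins k l))).map
        (fun w => (w, (↑(List.count w (kl.flatMap (fun k => wins k l))) : Int)))).filter
        (fun p => p.2 > 1)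
      = kl.flatMap (winF l) := by
  induction kl with
  | nil => simp [PySem.Set.ofList]
  | cons k rest ih =>
    have hk : k ∉ rest := (List.nodup_cons.1 hnd).1
    have hdisj : ∀ y ∈ rest.flatMap (fun k' => wins k' l), y ∉ wins k l := by
      intro y hy hyk
      obtain ⟨k', hk', hy'⟩ := List.mem_flatMap.1 hy
      have h1 := length_of_mem_wins k' l y hy'
      have h2 := length_of_mem_wins k l y hyk
      have : k' = k := by omega
      exact hk (this ▸ hk')
    rw [List.flatMap_cons, set_ofList_append _ _ hdisj, List.map_append, List.filter_append,
      List.flatMap_cons]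
    congr 1
    · unfold winF
      congr 1
      refine List.map_congr_left (fun w hw => ?_)
      have hw' : w ∈ wins k l := (PySem.Set.mem_ofList _ _).1 hw
      have hnot : w ∉ rest.flatMap (fun k' => wins k' l) := fun hc => hdisj w hc hw'
      rw [List.count_append, List.count_eq_zero.2 hnot]
      simp
    · rw [← ih (List.nodup_cons.1 hnd).2]
      congr 1
      refine List.map_congr_left (fun w hw => ?_)
      have hw' : w ∈ rest.flatMap (fun k' => wins k' l) := (PySem.Set.mem_ofList _ _).1 hw
      have hnot : w ∉ wins k l := fun hc => hdisj w hw' hc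
      rw [List.count_append, List.count_eq_zero.2 hnot]
      simp

theorem map_take_wins_sublist (k : Nat) (l : List Int) :
    ((wins (k + 1) l).map (List.take k)).Sublist (wins k l) := by
  induction l with
  | nil => simp [wins]
  | cons x t ih =>
    by_cases h : k + 1 ≤ t.length + 1
    · rw [wins, if_pos h, wins, if_pos (by omega)]
      simp only [List.map_cons]
      rw [List.take_take, min_eq_left (by omega)]
      exact List.Sublist.cons₂ _ ih
    · rw [wins, if_neg h]
      simp

theorem winF_eq_nil_iff (l : List Int) (k : Nat) : winF l k = [] ↔ (wins k l).Nodup := by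
  unfold winF
  rw [List.filter_eq_nil_iff]
  constructor
  · intro h
    rw [List.nodup_iff_count_le_one]
    intro w
    by_cases hw : w ∈ wins k l
    · have := h _ (List.mem_map.2 ⟨w, (PySem.Set.mem_ofList _ _).2 hw, rfl⟩)
      simp at this
      omega
    · rw [List.count_eq_zero.2 hw]
      omega
  · intro h p hp
    obtain ⟨w, hw, rfl⟩ := List.mem_map.1 hp
    have := List.nodup_iff_count_le_one.1 h w
    simp
    omega

theorem winF_empty_succ (l : List Int) (k : Nat) (h : winF l k = []) : winF l (k + 1) = [] := by
  rw [winF_eq_nil_iff] at h ⊢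
  exact ((map_take_wins_sublist k l).nodup h).of_map _

theorem winF_empty_add (l : List Int) (k : Nat) (h : winF l k = []) (m : Nat) :
    winF l (k + m) = [] := by
  induction m with
  | zero => exact h
  | succ m ih => exact (by simpa [← Nat.add_assoc] using winF_empty_succ l (k + m) ih)

theorem altLevel_eq_winF (l : List Int) (k : Int) (h1 : 2 ≤ k) (h2 : k ≤ (l.length : Int)) :
    altLevel l (l.length : Int) k = winF l k.toNat := by
  unfold altLevel
  show (((PySem.List.pyRange 0 ((l.length : Int) - k + 1) 1).foldl
      (fun d i => d.insert (PySem.List.slice l (some i) (some (i + k)))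
        (d.getD (PySem.List.slice l (some i) (some (i + k))) 0 + 1))
      PySem.Dict.empty).items).filter (fun p => p.2 > 1) = winF l k.toNat
  rw [← List.foldl_map (f := fun i => PySem.List.slice l (some i) (some (i + k)))
      (g := fun (d : PySem.Dict (List Int) Int) w => d.insert w (d.getD w 0 + 1)),
    bwin_eq_wins l k (by omega) h2,
    PySem.Dict.foldl_insert_getD_add_one_eq_counter, PySem.Dict.items_counter]
  rfl

theorem keys_winF_length (l : List Int) (k : Nat) (p : List Int × Int) (hp : p ∈ winF l k) :
    p.1.length = k := by
  unfold winF at hp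
  obtain ⟨w, hw, rfl⟩ := List.mem_map.1 (List.mem_of_mem_filter hp)
  exact length_of_mem_wins k l w ((PySem.Set.mem_ofList _ _).1 hw)

theorem keys_winF_nodup (l : List Int) (k : Nat) : ((winF l k).map (·.1)).Nodup := by
  have hsub : ((winF l k).map (·.1)).Sublist
      ((((PySem.Set.ofList (wins k l)).map
        (fun w => (w, (↑(List.count w (wins k l)) : Int)))).map (·.1))) :=
    List.Sublist.map _ (List.filter_sublist)
  rw [List.map_map] at hsub
  have : ((PySem.Set.ofList (wins k l)).map ((·.1) ∘ (fun w => (w, (↑(List.count w (wins k l)) : Int)))))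
      = PySem.Set.ofList (wins k l) := by
    simp [Function.comp_def]
  rw [this] at hsub
  exact hsub.nodup (PySem.Set.nodup_ofList _)

theorem keys_flatMap_winF_nodup (kl : List Nat) (l : List Int) (hnd : kl.Nodup) :
    ((kl.flatMap (winF l)).map (·.1)).Nodup := by
  induction kl with
  | nil => simp
  | cons k rest ih =>
    rw [List.flatMap_cons, List.map_append, List.nodup_append]
    refine ⟨keys_winF_nodup l k, ih (List.nodup_cons.1 hnd).2, ?_⟩
    intro a ha b hb hab
    obtain ⟨p, hp, rfl⟩ := List.mem_map.1 ha
    obtain ⟨q, hq, rfl⟩ := List.mem_map.1 hb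
    obtain ⟨k', hk', hq'⟩ := List.mem_flatMap.1 hq
    have h1 := keys_winF_length l k p hp
    have h2 := keys_winF_length l k' q hq'
    rw [hab] at h1
    have : k' = k := by omega
    exact (List.nodup_cons.1 hnd).1 (this ▸ hk')

theorem altGo_eq (l : List Int) (m : Nat) (k : Int) (hk : 2 ≤ k)
    (hm : ((l.length : Int) + 1 - k).toNat = m) (acc : List (List Int × Int)) :
    altGo l (l.length : Int) k acc
      = acc ++ (PySem.List.pyRange k ((l.length : Int) + 1) 1).flatMap (fun j => winF l j.toNat) := by
  induction m generalizing k acc with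
  | zero =>
    have hgt : ¬ k ≤ (l.length : Int) := by omega
    rw [altGo, dif_neg hgt, PySem.List.pyRange_one_eq_nil (by omega)]
    simp
  | succ m ih =>
    have hle : k ≤ (l.length : Int) := by omega
    rw [altGo, dif_pos hle]
    simp only [altLevel_eq_winF l k hk hle]
    by_cases hF : winF l k.toNat = []
    · rw [if_pos hF, PySem.List.pyRange_one_cons (by omega), List.flatMap_cons, hF]
      have hrest : (PySem.List.pyRange (k + 1) ((l.length : Int) + 1) 1).flatMap
          (fun j => winF l j.toNat) = [] := by
        rw [List.flatMap_eq_nil_iff]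
        intro j hj
        have hj' := (PySem.List.mem_pyRange_one).1 hj
        have : j.toNat = k.toNat + (j.toNat - k.toNat) := by omega
        rw [this]
        exact winF_empty_add l k.toNat hF _
      rw [hrest]
      simp
    · rw [if_neg hF, ih (k + 1) (by omega) (by omega) (acc ++ winF l k.toNat),
        PySem.List.pyRange_one_cons (a := k) (b := (l.length : Int) + 1) (by omega),
        List.flatMap_cons, List.append_assoc]

-- ===== VERDICT (by name: the statement is the Claim_ definition above) =====
theorem find_patterns_spec : Claim_equal_find_patterns := by
  intro la lb _
  show find_patterns la lb = find_patterns_alt la lb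
  unfold find_patterns find_patterns_alt
  simp only []
  have h2mem : ∀ x ∈ PySem.List.pyRange 2 ((la.length : Int) + 1) 1, 2 ≤ x :=
    fun x hx => ((PySem.List.mem_pyRange_one).1 hx).1
  have hkl : ((PySem.List.pyRange 2 ((la.length : Int) + 1) 1).map Int.toNat).Nodup := by
    have hpw : List.Pairwise (fun a b : Int => a.toNat ≠ b.toNat)
        (PySem.List.pyRange 2 ((la.length : Int) + 1) 1) :=
      (PySem.List.pairwise_lt_pyRange_one 2 ((la.length : Int) + 1)).imp_of_mem
        (fun ha hb hlt => by have := h2mem _ ha; have := h2mem _ hb; omega)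
    exact hpw.map _ (fun a b h => h)
  rw [PySem.List.foldl_append_eq_flatMap (g := fun k => find_ngrams la k), List.nil_append,
    List.flatMap_congr (fun k hk => ngrams_eq_wins la k (by have := h2mem k hk; omega)),
    show (PySem.List.pyRange 2 ((la.length : Int) + 1) 1).flatMap (fun k => wins k.toNat la)
        = ((PySem.List.pyRange 2 ((la.length : Int) + 1) 1).map Int.toNat).flatMap
            (fun k => wins k la) from
      (List.flatMap_map Int.toNat (fun k => wins k la) _).symm,
    PySem.Dict.foldl_insert_getD_add_one_eq_counter]
  have hndkeys : ((PySem.Dict.counter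
      (((PySem.List.pyRange 2 ((la.length : Int) + 1) 1).map Int.toNat).flatMap
        (fun k => wins k la))).items.map (·.1)).Nodup := by
    rw [PySem.Dict.items_counter, List.map_map]
    simp only [Function.comp_def, List.map_id']
    exact PySem.Set.nodup_ofList _
  rw [filter_loop_items _ hndkeys, PySem.Dict.items_counter,
    decompose _ la hkl,
    altGo_eq la (((la.length : Int) + 1 - 2).toNat) 2 (by omega) rfl [], List.nil_append,
    show (PySem.List.pyRange 2 ((la.length : Int) + 1) 1).flatMap (fun j => winF la j.toNat)
        = ((PySem.List.pyRange 2 ((la.length : Int) + 1) 1).map Int.toNat).flatMap (winF la)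
      from (List.flatMap_map Int.toNat (winF la) _).symm,
    ofList_items _ (keys_flatMap_winF_nodup _ la hkl)]
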